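-- pv_equiv track=rewrite | github.com/nwyin/tau | benchmarks/fuzzy-match/generate_corpus.py | extract_blocks_newline_join
-- ===== SOURCE A (Python) =====
-- def extract_blocks_newline_join(content: str, min_lines: int = 3, max_lines: int = 30) -> list[tuple[int, int, str]]:
--     """Extract blocks using newline join (for adversarial corpus)."""
--     lines = content.split("\n")
--     blocks: list[tuple[int, int, str]] = []
--     i = 0
--     while i < len(lines):
--         if not lines[i].strip():
--             i += 1
--             continue
--         j = i
--         while j < len(lines) and lines[j].strip():
--             j += 1
--         block_len = j - i
--         if min_lines <= block_len <= max_lines: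
--             block_text = "\n".join(lines[i:j])
--             blocks.append((i, j, block_text))
--         i = j
--     return blocks
-- ===== SOURCE B (Python) =====
-- def extract_blocks_newline_join(content: str, min_lines: int = 3, max_lines: int = 30) -> list[tuple[int, int, str]]:
--     """Extract blocks using newline join (for adversarial corpus)."""
--     lines = content.split("\n")
--     # Phase 1: group consecutive lines into runs of equal blankness.
--     runs: list[tuple[bool, list[str]]] = []
--     for line in lines:
--         nonblank = bool(line.strip())
--         if runs and runs[-1][0] == nonblank:
--             runs[-1][1].append(line)
--         else:
--             runs.append((nonblank, [line]))
--     # Phase 2: walk the runs with a running offset, emitting qualifying blocks.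
--     blocks: list[tuple[int, int, str]] = []
--     offset = 0
--     for nonblank, group in runs:
--         n = len(group)
--         if nonblank and min_lines <= n <= max_lines:
--             blocks.append((offset, offset + n, "\n".join(group)))
--         offset += n
--     return blocks
-- ===== Notes on version B (the rewrite author's own statement) =====
-- stated objective: alternative
-- what changed: A scans with nested index-chasing while loops (i/j) slicing lines[i:j]; B first groups the lines into alternating blank/non-blank runs in one pass, then walks the runs with a running offset, emitting the non-blank runs whose length is in range.
import Mathlib
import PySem

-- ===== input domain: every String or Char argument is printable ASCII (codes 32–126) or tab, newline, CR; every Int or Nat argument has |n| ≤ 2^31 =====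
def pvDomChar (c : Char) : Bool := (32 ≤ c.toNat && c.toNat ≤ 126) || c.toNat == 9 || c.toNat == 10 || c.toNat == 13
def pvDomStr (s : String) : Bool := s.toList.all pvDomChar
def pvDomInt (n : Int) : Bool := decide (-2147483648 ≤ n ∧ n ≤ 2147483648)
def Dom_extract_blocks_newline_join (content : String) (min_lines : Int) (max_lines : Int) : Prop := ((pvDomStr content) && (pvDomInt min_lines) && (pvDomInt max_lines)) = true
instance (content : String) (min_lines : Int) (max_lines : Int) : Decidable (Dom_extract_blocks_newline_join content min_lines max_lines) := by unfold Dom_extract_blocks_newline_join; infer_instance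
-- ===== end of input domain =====

-- B replaces A's index-chasing while-loops by a two-phase decomposition (group lines
-- into blank/non-blank runs, then emit qualifying runs with a running offset); objective: alternative.


-- ===== PORT A =====
-- `not lines[i].strip()` — a line is blank iff its strip is empty
def pvBlank (l : List Char) : Bool := (PySem.Chars.strip l).isEmpty

-- inner while loop: number of consecutive non-blank lines from position j on (j - i)
def pvScanA : List (List Char) → Nat
  | [] => 0
  | l :: ls => if pvBlank l then 0 else pvScanA ls + 1

-- outer while loop of A, recursing on the suffix of lines at absolute index i
def pvLoopA (min_lines max_lines : Int) (i : Int) (ls : List (List Char))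
    (acc : List (Int × Int × String)) : List (Int × Int × String) :=
  match ls with
  | [] => acc
  | l :: rest =>
    if h : pvBlank l then pvLoopA min_lines max_lines (i + 1) rest acc
    else
      let k := pvScanA (l :: rest)
      let acc' := if min_lines ≤ (k : Int) ∧ (k : Int) ≤ max_lines then
          acc ++ [(i, i + (k : Int), String.ofList (PySem.Chars.join ['\n'] ((l :: rest).take k)))]
        else acc
      pvLoopA min_lines max_lines (i + (k : Int)) ((l :: rest).drop k) acc'
  termination_by ls.length
  decreasing_by
    · simp
    · have hk : pvScanA (l :: rest) = pvScanA rest + 1 := by simp [pvScanA, h]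
      simp only [List.length_drop, List.length_cons, hk]
      omega

def extract_blocks_newline_join (content : String) (min_lines : Int) (max_lines : Int) : List (Int × Int × String) :=
  pvLoopA min_lines max_lines 0 (PySem.Chars.splitOn content.toList ['\n']) []

-- ===== PORT B =====
-- phase-1 loop body: append the line to the last run if the blankness matches, else start a new run
def pvPush (runs : List (Bool × List (List Char))) (nb : Bool) (l : List Char) : List (Bool × List (List Char)) :=
  match runs.getLast? with
  | some (b, g) => if b == nb then runs.dropLast ++ [(b, g ++ [l])] else runs ++ [(nb, [l])]
  | none => [(nb, [l])]

def pvStepB (runs : List (Bool × List (List Char))) (l : List Char) : List (Bool × List (List Char)) :=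
  pvPush runs (!(pvBlank l)) l

-- phase-2 loop body: state is (offset, blocks)
def pvStepE (min_lines max_lines : Int) (st : Int × List (Int × Int × String))
    (r : Bool × List (List Char)) : Int × List (Int × Int × String) :=
  let n := r.2.length
  ( st.1 + (n : Int),
    if r.1 = true ∧ min_lines ≤ (n : Int) ∧ (n : Int) ≤ max_lines then
      st.2 ++ [(st.1, st.1 + (n : Int), String.ofList (PySem.Chars.join ['\n'] r.2))]
    else st.2 )

def extract_blocks_newline_join_alt (content : String) (min_lines : Int) (max_lines : Int) : List (Int × Int × String) :=
  (((PySem.Chars.splitOn content.toList ['\n']).foldl pvStepB []).foldl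
    (pvStepE min_lines max_lines) (0, [])).2

-- ===== PRECONDITION & SPEC =====
def Spec_extract_blocks_newline_join (content : String) (min_lines : Int) (max_lines : Int) (out : List (Int × Int × String)) : Prop := out = extract_blocks_newline_join_alt content min_lines max_lines
instance (content : String) (min_lines : Int) (max_lines : Int) (out : List (Int × Int × String)) : Decidable (Spec_extract_blocks_newline_join content min_lines max_lines out) := by unfold Spec_extract_blocks_newline_join; infer_instance

-- ===== CLAIM (what is proved, stated in full; the proofs are below) =====
def Claim_equal_extract_blocks_newline_join : Prop := ∀ (content : String) (min_lines : Int) (max_lines : Int), Dom_extract_blocks_newline_join content min_lines max_lines → Spec_extract_blocks_newline_join content min_lines max_lines (extract_blocks_newline_join content min_lines max_lines)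

-- ===== LEMMAS AND PROOFS =====

-- reference (right-recursive) form of B's run grouping
def pvConsRun (nb : Bool) (l : List Char) : List (Bool × List (List Char)) → List (Bool × List (List Char))
  | (b, g) :: rest => if b == nb then (b, l :: g) :: rest else (nb, [l]) :: (b, g) :: rest
  | [] => [(nb, [l])]

def pvRunsR : List (List Char) → List (Bool × List (List Char))
  | [] => []
  | l :: ls => pvConsRun (!(pvBlank l)) l (pvRunsR ls)

def pvMergeRuns (rs q : List (Bool × List (List Char))) : List (Bool × List (List Char)) :=
  match q with
  | [] => rs
  | (b, g) :: q' =>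
    match rs.getLast? with
    | some (b', g') => if b' == b then (rs.dropLast ++ [(b', g' ++ g)]) ++ q' else rs ++ (b, g) :: q'
    | none => (b, g) :: q'

lemma pvMergeRuns_nil (q : List (Bool × List (List Char))) : pvMergeRuns [] q = q := by
  cases q with
  | nil => rfl
  | cons p q' => obtain ⟨b, g⟩ := p; simp [pvMergeRuns]

lemma pvPush_merge (rs : List (Bool × List (List Char))) (nb : Bool) (l : List Char)
    (q : List (Bool × List (List Char))) :
    pvMergeRuns (pvPush rs nb l) q = pvMergeRuns rs (pvConsRun nb l q) := by
  cases q with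
  | nil =>
    cases hr : rs.getLast? with
    | none =>
      have hrs : rs = [] := List.getLast?_eq_none_iff.mp hr
      subst hrs; simp [pvPush, pvMergeRuns, pvConsRun]
    | some p =>
      obtain ⟨b', g'⟩ := p
      by_cases hb : b' = nb <;>
        simp [pvPush, pvMergeRuns, pvConsRun, hr, hb, List.getLast?_concat]
  | cons p q' =>
    obtain ⟨b, g⟩ := p
    cases hr : rs.getLast? with
    | none =>
      have hrs : rs = [] := List.getLast?_eq_none_iff.mp hr
      subst hrs
      by_cases hb : b = nb
      · subst hb; simp [pvPush, pvMergeRuns, pvConsRun]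
      · simp [pvPush, pvMergeRuns, pvConsRun, hb, Ne.symm hb]
    | some p'
    =>
      obtain ⟨b', g'⟩ := p'
      by_cases hb' : b' = nb <;> by_cases hb : b = nb
      · subst hb' hb
        simp [pvPush, pvMergeRuns, pvConsRun, hr, List.getLast?_concat,
          List.dropLast_concat]
      · subst hb'
        simp [pvPush, pvMergeRuns, pvConsRun, hr, List.getLast?_concat,
          List.dropLast_concat, hb, Ne.symm hb]
      · subst hb
        simp [pvPush, pvMergeRuns, pvConsRun, hr, List.getLast?_concat,
          List.dropLast_concat, hb', Ne.symm hb']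
      · simp [pvPush, pvMergeRuns, pvConsRun, hr, List.getLast?_concat,
          List.dropLast_concat, hb, hb', Ne.symm hb, Ne.symm hb']

lemma pvFoldlB (ls : List (List Char)) :
    ∀ rs, ls.foldl pvStepB rs = pvMergeRuns rs (pvRunsR ls) := by
  induction ls with
  | nil => intro rs; rfl
  | cons l ls ih =>
    intro rs
    calc (l :: ls).foldl pvStepB rs = ls.foldl pvStepB (pvStepB rs l) := rfl
      _ = pvMergeRuns (pvStepB rs l) (pvRunsR ls) := ih _
      _ = pvMergeRuns rs (pvConsRun (!(pvBlank l)) l (pvRunsR ls)) := pvPush_merge ..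
      _ = pvMergeRuns rs (pvRunsR (l :: ls)) := rfl

-- recursive form of phase 2
def pvEmitR (min_lines max_lines : Int) (off : Int) :
    List (Bool × List (List Char)) → List (Int × Int × String)
  | [] => []
  | (nb, g) :: rest =>
    (if nb = true ∧ min_lines ≤ (g.length : Int) ∧ (g.length : Int) ≤ max_lines then
      [(off, off + (g.length : Int), String.ofList (PySem.Chars.join ['\n'] g))] else [])
    ++ pvEmitR min_lines max_lines (off + (g.length : Int)) rest

lemma pvFoldlE (min_lines max_lines : Int) (runs : List (Bool × List (List Char))) :
    ∀ off blocks, (runs.foldl (pvStepE min_lines max_lines) (off, blocks)).2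
      = blocks ++ pvEmitR min_lines max_lines off runs := by
  induction runs with
  | nil => intro off blocks; simp [pvEmitR]
  | cons r rest ih =>
    intro off blocks
    obtain ⟨nb, g⟩ := r
    by_cases h : nb = true ∧ min_lines ≤ (g.length : Int) ∧ (g.length : Int) ≤ max_lines <;>
      simp [List.foldl_cons, pvStepE, pvEmitR, h, ih]

-- head key of pvRunsR is the blankness of the head line
lemma pvRunsR_cons (l : List Char) (ls : List (List Char)) :
    ∃ g rest, pvRunsR (l :: ls) = (!(pvBlank l), g) :: rest := by
  show ∃ g rest, pvConsRun (!(pvBlank l)) l (pvRunsR ls) = _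
  cases hq : pvRunsR ls with
  | nil => exact ⟨[l], [], rfl⟩
  | cons p q' =>
    obtain ⟨b, g⟩ := p
    by_cases hb : b = !(pvBlank l)
    · subst hb; exact ⟨l :: g, q', by simp [pvConsRun]⟩
    · exact ⟨[l], (b, g) :: q', by simp [pvConsRun, hb]⟩

lemma pvEmit_blank (min_lines max_lines : Int) (l : List Char) (ls : List (List Char))
    (hl : pvBlank l = true) (off : Int) :
    pvEmitR min_lines max_lines off (pvRunsR (l :: ls))
      = pvEmitR min_lines max_lines (off + 1) (pvRunsR ls) := by
  show pvEmitR min_lines max_lines off (pvConsRun (!(pvBlank l)) l (pvRunsR ls)) = _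
  rw [hl]
  cases hq : pvRunsR ls with
  | nil => simp [pvConsRun, pvEmitR]
  | cons p q' =>
    obtain ⟨b, g⟩ := p
    cases b with
    | false =>
      simp only [pvConsRun, Bool.not_true, beq_self_eq_true, if_true, pvEmitR,
        List.length_cons, Bool.false_eq_true, false_and, if_neg, List.nil_append]
      have harith : off + (((g.length : Int)) + 1) = (off + 1) + (g.length : Int) := by ring
      push_cast
      rw [harith]
    | true => simp [pvConsRun, pvEmitR]

lemma pvScan_split (l : List Char) (ls : List (List Char)) (hl : pvBlank l = false) :
    pvRunsR (l :: ls) = (true, (l :: ls).take (pvScanA (l :: ls)))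
      :: pvRunsR ((l :: ls).drop (pvScanA (l :: ls))) := by
  induction ls generalizing l with
  | nil => simp [pvScanA, hl, pvRunsR, pvConsRun]
  | cons l' ls' ih =>
    have hk : pvScanA (l :: l' :: ls') = pvScanA (l' :: ls') + 1 := by simp [pvScanA, hl]
    by_cases hl' : pvBlank l' = true
    · have hk' : pvScanA (l' :: ls') = 0 := by simp [pvScanA, hl']
      obtain ⟨g, rest, hq⟩ := pvRunsR_cons l' ls'
      rw [hl'] at hq
      show pvConsRun (!(pvBlank l)) l (pvRunsR (l' :: ls')) = _
      rw [hl, hq]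
      simp [pvConsRun, hk, hk']
      exact hq.symm
    · have hl'' : pvBlank l' = false := by simpa using hl'
      have := ih l' hl''
      show pvConsRun (!(pvBlank l)) l (pvRunsR (l' :: ls')) = _
      rw [this, hl]
      simp [pvConsRun, hk, List.take_succ_cons, List.drop_succ_cons]

lemma pvScanA_le (ls : List (List Char)) : pvScanA ls ≤ ls.length := by
  induction ls with
  | nil => simp [pvScanA]
  | cons l ls ih => by_cases h : pvBlank l <;> simp [pvScanA, h] <;> omega

lemma pvLoopA_emit (min_lines max_lines : Int) :
    ∀ n (ls : List (List Char)), ls.length ≤ n → ∀ (i : Int) acc,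
      pvLoopA min_lines max_lines i ls acc
        = acc ++ pvEmitR min_lines max_lines i (pvRunsR ls) := by
  intro n
  induction n with
  | zero =>
    intro ls hls i acc
    have : ls = [] := List.eq_nil_of_length_eq_zero (Nat.le_zero.mp hls)
    subst this; simp [pvLoopA, pvRunsR, pvEmitR]
  | succ n ih =>
    intro ls hls i acc
    cases ls with
    | nil => simp [pvLoopA, pvRunsR, pvEmitR]
    | cons l rest =>
      by_cases hl : pvBlank l = true
      · rw [show pvLoopA min_lines max_lines i (l :: rest) acc
            = pvLoopA min_lines max_lines (i + 1) rest acc by simp [pvLoopA, hl]]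
        rw [ih rest (by simpa using Nat.lt_succ_iff.mp (Nat.lt_of_lt_of_le (by simp) hls)) (i + 1) acc]
        rw [pvEmit_blank min_lines max_lines l rest hl i]
      · have hl' : pvBlank l = false := by simpa using hl
        set k := pvScanA (l :: rest) with hkdef
        have hk1 : 1 ≤ k := by simp [hkdef, pvScanA, hl']
        have hkle : k ≤ (l :: rest).length := pvScanA_le _
        set acc' := if min_lines ≤ (k : Int) ∧ (k : Int) ≤ max_lines then
            acc ++ [(i, i + (k : Int), String.ofList (PySem.Chars.join ['\n'] ((l :: rest).take k)))]
          else acc with hacc'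
        have hstep : pvLoopA min_lines max_lines i (l :: rest) acc
            = pvLoopA min_lines max_lines (i + (k : Int)) ((l :: rest).drop k) acc' := by
          rw [pvLoopA]; simp [hl, ← hkdef, ← hacc']
        have hlencons : (l :: rest).length = rest.length + 1 := by simp
        have hdlen : ((l :: rest).drop k).length ≤ n := by
          simp only [List.length_drop, hlencons]
          rw [hlencons] at hls
          omega
        rw [hstep, ih _ hdlen (i + (k : Int)) acc']
        rw [pvScan_split l rest hl']
        have hlen : ((l :: rest).take k).length = k := List.length_take_of_le hkle
        rw [pvEmitR, hlen]
        by_cases hcond : min_lines ≤ (k : Int) ∧ (k : Int) ≤ max_lines <;>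
          simp [hacc', hcond, ← hkdef]

-- ===== VERDICT (by name: the statement is the Claim_ definition above) =====
theorem extract_blocks_newline_join_spec : Claim_equal_extract_blocks_newline_join := by
  intro content min_lines max_lines _
  show extract_blocks_newline_join content min_lines max_lines
      = extract_blocks_newline_join_alt content min_lines max_lines
  unfold extract_blocks_newline_join extract_blocks_newline_join_alt
  rw [pvLoopA_emit min_lines max_lines (PySem.Chars.splitOn content.toList ['\n']).length _ le_rfl 0 []]
  rw [pvFoldlB, pvMergeRuns_nil, pvFoldlE]
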